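-- pv_equiv track=rewrite | github.com/JamesDev51/algorithm | 프로그래머스 (Programmers)/Level_1/과일 장수.py | solution
-- ===== SOURCE A (Python) =====
-- def solution(k, m, score):
--     answer = 0
--     score.sort(reverse=True)
--     start_idx=0
--     while len(score)-start_idx>=m:
--         minimum=min(score[start_idx:start_idx+m])
--         answer+=(minimum*m)
--         start_idx+=m
--     return answer
-- ===== SOURCE B (Python) =====
-- def solution(k, m, score):
--     # Return-value equivalence: A sorts `score` descending in place; B does not mutate it.
--     s = sorted(score)
--     r = len(s) % m
--     total = 0
--     for i, v in enumerate(s):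
--         if i % m == r:
--             total += v
--     return m * total
-- ===== Notes on version B (the rewrite author's own statement) =====
-- stated objective: alternative
-- what changed: B sorts ASCENDING (non-mutating) and makes one pass over enumerate(s), adding exactly the elements whose rank is congruent to len(s)%m modulo m (the minima of the complete groups, counted from the weak end), then multiplies by m once; A sorts descending in place and scans each m-window with min().
import Mathlib
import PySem

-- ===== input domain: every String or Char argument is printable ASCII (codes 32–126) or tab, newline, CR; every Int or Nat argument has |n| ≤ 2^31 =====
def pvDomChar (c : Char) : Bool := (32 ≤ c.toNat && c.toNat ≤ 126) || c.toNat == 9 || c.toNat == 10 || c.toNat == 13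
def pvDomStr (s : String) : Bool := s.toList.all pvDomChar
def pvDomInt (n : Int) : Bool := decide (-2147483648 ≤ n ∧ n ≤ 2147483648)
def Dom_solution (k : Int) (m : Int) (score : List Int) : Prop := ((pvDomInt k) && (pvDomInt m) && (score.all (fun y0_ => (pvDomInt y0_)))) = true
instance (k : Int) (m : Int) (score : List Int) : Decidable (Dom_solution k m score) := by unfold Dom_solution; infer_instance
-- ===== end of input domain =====

-- B sorts ASCENDING (without mutating `score`) and makes one pass over enumerate(s), adding the
-- elements whose rank is ≡ len(s) % m (mod m) — the minima of the complete groups counted from the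
-- weak end — then multiplies by m once; A sorts descending IN PLACE and scans each m-window with
-- min(). Equivalence is about the RETURN value only (A mutates `score`, B does not).
-- Pre_solution excludes m ≤ 0, on which Python A raises ValueError (min of an empty slice) or
-- loops forever, and B raises ZeroDivisionError or picks meaningless ranks.

-- ===== PORT A =====
def loopA (s : List Int) (m : Int) : Nat → Int → Int → Int
  | 0, _, answer => answer
  | fuel + 1, start_idx, answer =>
    if PySem.List.len s - start_idx ≥ m then
      match PySem.List.min? (PySem.List.slice s (some start_idx) (some (start_idx + m))) (fun x => x) with
      | some minimum => loopA s m fuel (start_idx + m) (answer + minimum * m)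
      | none => answer   -- Python raises ValueError here (empty slice); unreachable under Pre_solution
    else answer

def solution (k : Int) (m : Int) (score : List Int) : Int :=
  loopA (PySem.List.sorted score (fun x => x) true) m (score.length + 1) 0 0

-- ===== PORT B =====
def solution_alt (k : Int) (m : Int) (score : List Int) : Int :=
  let s := PySem.List.sorted score (fun x => x) false
  let r := PySem.Int.mod (PySem.List.len s) m
  let total := (PySem.List.enumerate s 0).foldl
    (fun total p => if PySem.Int.mod p.1 m = r then total + p.2 else total) 0
  m * total

-- ===== PRECONDITION & SPEC =====
def Pre_solution (k : Int) (m : Int) (score : List Int) : Prop := 1 ≤ m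
instance (k : Int) (m : Int) (score : List Int) : Decidable (Pre_solution k m score) := by unfold Pre_solution; infer_instance

def pvWitness_solution : Int × Int × List Int := (4, 3, [5, 2, 3, 1, 4])

def Spec_solution (k : Int) (m : Int) (score : List Int) (out : Int) : Prop := out = solution_alt k m score
instance (k : Int) (m : Int) (score : List Int) (out : Int) : Decidable (Spec_solution k m score out) := by unfold Spec_solution; infer_instance

-- ===== CLAIM (what is proved, stated in full; the proofs are below) =====
def Claim_equal_solution : Prop := ∀ (k : Int) (m : Int) (score : List Int), Dom_solution k m score → Pre_solution k m score → Spec_solution k m score (solution k m score)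

-- ===== LEMMAS AND PROOFS =====

-- range(a, b, s) with 0 < s is empty when b ≤ a
lemma pyRange_pos_eq_nil (a b s : Int) (hs : 0 < s) (h : b ≤ a) :
    PySem.List.pyRange a b s = [] := by
  rw [PySem.List.pyRange_of_pos a b hs]
  simp [show ¬ a < b by omega]

-- range(a, b, s) with 0 < s and a < b starts with a
lemma pyRange_pos_cons (a b s : Int) (hs : 0 < s) (h : a < b) :
    PySem.List.pyRange a b s = a :: PySem.List.pyRange (a + s) b s := by
  rw [PySem.List.pyRange_of_pos a b hs, PySem.List.pyRange_of_pos (a + s) b hs]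
  have key : (b - a + s - 1) / s = (b - (a + s) + s - 1) / s + 1 := by
    have e : b - a + s - 1 = (b - (a + s) + s - 1) + 1 * s := by ring
    rw [e, Int.add_mul_ediv_right _ _ hs.ne']
  have hnn : 0 ≤ (b - (a + s) + s - 1) / s := Int.ediv_nonneg (by omega) hs.le
  by_cases h2 : a + s < b
  · rw [if_pos h, if_pos h2, key,
      show ((b - (a + s) + s - 1) / s + 1).toNat = ((b - (a + s) + s - 1) / s).toNat + 1 by omega,
      List.range_succ_eq_map]
    simp only [List.map_cons, List.map_map, Nat.cast_zero, mul_zero, add_zero]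
    refine congrArg _ (List.map_congr_left ?_)
    intro k _
    simp only [Function.comp_apply]
    push_cast
    ring
  · have h0 : (b - (a + s) + s - 1) / s = 0 := Int.ediv_eq_zero_of_lt (by omega) (by omega)
    rw [if_pos h, if_neg h2, key, h0]
    simp

-- running min over a descending tail reaches the last element
lemma foldl_min_desc : ∀ (t : List Int) (x : Int), (x :: t).Pairwise (fun a b => b ≤ a) →
    t.foldl min x = (x :: t).getLast (by simp)
  | [], x, _ => rfl
  | y :: u, x, hd => by
    have hyx : y ≤ x := (List.pairwise_cons.mp hd).1 y (by simp)
    have hd' : (y :: u).Pairwise (fun a b => b ≤ a) := (List.pairwise_cons.mp hd).2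
    rw [List.foldl_cons, min_eq_right hyx, List.getLast_cons (by simp)]
    exact foldl_min_desc u y hd'

-- min of a nonempty descending list is its last element
lemma min?_desc (t : List Int) (hd : t.Pairwise (fun a b => b ≤ a)) (h : t ≠ []) :
    PySem.List.min? t (fun x => x) = some (t.getLast h) := by
  cases t with
  | nil => exact absurd rfl h
  | cons x u => rw [PySem.List.min?_id_cons, foldl_min_desc u x hd]

-- the loop of A computes the strided sum over the last index of each window
lemma loopA_eq (s : List Int) (hs : s.Pairwise (fun a b => b ≤ a)) (m : Int) (hm : 1 ≤ m) :
    ∀ (fuel : Nat) (start answer : Int), 0 ≤ start → (s.length : Int) ≤ fuel + start →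
    loopA s m fuel start answer
      = answer + ((PySem.List.pyRange (start + m - 1) (s.length) m).map
          (fun i => PySem.List.pyGetD s i 0)).sum * m := by
  intro fuel
  induction fuel with
  | zero =>
    intro start answer h0 hlen
    rw [pyRange_pos_eq_nil _ _ m (by omega) (by omega)]
    simp [loopA]
  | succ fuel ih =>
    intro start answer h0 hlen
    simp only [loopA, PySem.List.len_eq]
    by_cases hc : (s.length : Int) - start ≥ m
    · rw [if_pos hc]
      have hjn : start.toNat + m.toNat ≤ s.length := by omega
      have hslice : PySem.List.slice s (some start) (some (start + m))
          = (s.drop start.toNat).take m.toNat := by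
        rw [PySem.List.slice_toNat s h0 (by omega)]
        congr 1
        omega
      have hlt : (s.drop start.toNat).take m.toNat ≠ [] := by
        have : ((s.drop start.toNat).take m.toNat).length = m.toNat := by
          simp; omega
        intro hnil
        rw [hnil] at this
        simp at this
        omega
      have hsub : ((s.drop start.toNat).take m.toNat).Sublist s :=
        (List.take_sublist _ _).trans (List.drop_sublist _ _)
      have hdesc : ((s.drop start.toNat).take m.toNat).Pairwise (fun a b => b ≤ a) :=
        hs.sublist hsub
      rw [hslice, min?_desc _ hdesc hlt]
      have hlenw : ((s.drop start.toNat).take m.toNat).length = m.toNat := by simp; omega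
      have hidx : start.toNat + (m.toNat - 1) < s.length := by omega
      have hlast : ((s.drop start.toNat).take m.toNat).getLast hlt
          = s[start.toNat + (m.toNat - 1)] := by
        rw [List.getLast_eq_getElem]
        simp only [hlenw]
        rw [List.getElem_take, List.getElem_drop]
      rw [hlast]
      rw [pyRange_pos_cons _ _ m (by omega) (by omega)]
      rw [List.map_cons, List.sum_cons]
      have hget : PySem.List.pyGetD s (start + m - 1) 0 = s[start.toNat + (m.toNat - 1)] := by
        rw [PySem.List.pyGetD_eq_getElem s 0 (by omega) (by omega)]
        congr 1
        omega
      rw [hget]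
      dsimp only
      rw [ih (start + m) (answer + s[start.toNat + (m.toNat - 1)] * m) (by omega) (by omega)]
      rw [show start + m - 1 + m = start + m + m - 1 by ring]
      ring
    · rw [if_neg hc]
      rw [pyRange_pos_eq_nil _ _ m (by omega) (by omega)]
      simp

-- sorting descending is reversing the ascending sort (Int values: ties are equal values)
lemma sorted_rev_eq_reverse (xs : List Int) :
    PySem.List.sorted xs (fun x => x) true = (PySem.List.sorted xs (fun x => x) false).reverse := by
  refine PySem.List.eq_of_perm_of_pairwise_le_of_injective (fun x : Int => -x)
    neg_injective ?_ ?_ ?_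
  · exact (PySem.List.sorted_perm xs _ true).trans
      ((List.reverse_perm _).trans (PySem.List.sorted_perm xs _ false)).symm
  · exact (PySem.List.sorted_pairwise_rev xs (fun x => x)).imp (by intro a b h; dsimp only; omega)
  · rw [List.pairwise_reverse]
    exact (PySem.List.sorted_pairwise xs (fun x => x)).imp (by intro a b h; dsimp only; omega)

-- a list-sum over List.range is a Finset.range sum
lemma sum_map_range_eq (N : Nat) (f : Nat → Int) :
    ((List.range N).map f).sum = ∑ i ∈ Finset.range N, f i := rfl

-- B's filtered pass over enumerate, as a Finset sum over all ranks
lemma foldl_enum_eq (m r : Int) : ∀ (l : List Int) (st init : Int),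
    (PySem.List.enumerate l st).foldl
        (fun total p => if PySem.Int.mod p.1 m = r then total + p.2 else total) init
      = init + ∑ j ∈ Finset.range l.length,
          (if PySem.Int.mod (st + j) m = r then l.getD j 0 else 0) := by
  intro l
  induction l with
  | nil => intro st init; simp [PySem.List.enumerate_nil]
  | cons x xs ih =>
    intro st init
    rw [PySem.List.enumerate_cons, List.foldl_cons]
    rw [ih (st + 1) _]
    rw [List.length_cons, Finset.sum_range_succ']
    simp only [Nat.cast_zero, add_zero, Nat.cast_add, Nat.cast_one, List.getD_cons_zero,
      List.getD_cons_succ]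
    have hre : ∀ j : Nat, st + 1 + (j : Int) = st + ((j : Int) + 1) := by intro j; ring
    by_cases hc : PySem.Int.mod st m = r
    · rw [if_pos hc, if_pos hc]
      rw [Finset.sum_congr rfl (fun j _ => by rw [hre j])]
      ring
    · rw [if_neg hc, if_neg hc]
      rw [Finset.sum_congr rfl (fun j _ => by rw [hre j])]
      ring

-- the ranks ≡ n % M (mod M) below n are exactly n % M + t*M for t < n / M
lemma strided_sum (M : Nat) (hM : 1 ≤ M) (n : Nat) (f : Nat → Int) :
    ∑ j ∈ Finset.range n, (if j % M = n % M then f j else 0)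
      = ∑ t ∈ Finset.range (n / M), f (n % M + t * M) := by
  rw [← Finset.sum_filter]
  refine Finset.sum_nbij' (fun j => (j - n % M) / M) (fun t => n % M + t * M) ?_ ?_ ?_ ?_ ?_
  · intro j hj
    simp only [Finset.mem_filter, Finset.mem_range] at hj ⊢
    obtain ⟨hjn, hjm⟩ := hj
    have h1 := Nat.div_add_mod j M
    have h2 := Nat.div_add_mod n M
    have hsub : j - n % M = M * (j / M) := by omega
    rw [hsub, Nat.mul_div_cancel_left _ (by omega)]
    by_contra h
    have h3 : n / M ≤ j / M := by omega
    have := Nat.mul_le_mul_left M h3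
    omega
  · intro t ht
    simp only [Finset.mem_range] at ht
    simp only [Finset.mem_filter, Finset.mem_range]
    have h2 := Nat.div_add_mod n M
    have hlt : (t + 1) * M ≤ (n / M) * M := Nat.mul_le_mul_right M (by omega)
    constructor
    · have h3 : t * M + M = (t + 1) * M := by ring
      have h4 : M * (n / M) = (n / M) * M := Nat.mul_comm _ _
      omega
    · rw [Nat.add_mul_mod_self_right]
      exact Nat.mod_mod_of_dvd n dvd_rfl
  · intro j hj
    simp only [Finset.mem_filter, Finset.mem_range] at hj
    obtain ⟨hjn, hjm⟩ := hj
    dsimp only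
    have h1 := Nat.div_add_mod j M
    have hsub : j - n % M = M * (j / M) := by omega
    rw [hsub, Nat.mul_div_cancel_left _ (by omega)]
    have h6 : M * (j / M) = j / M * M := Nat.mul_comm _ _
    omega
  · intro t ht
    dsimp only
    have h5 : n % M + t * M - n % M = t * M := by omega
    rw [h5, Nat.mul_div_cancel _ (by omega)]
  · intro j hj
    simp only [Finset.mem_filter, Finset.mem_range] at hj
    obtain ⟨hjn, hjm⟩ := hj
    dsimp only
    have h1 := Nat.div_add_mod j M
    have hsub : j - n % M = M * (j / M) := by omega
    rw [hsub, Nat.mul_div_cancel_left _ (by omega)]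
    have h6 : M * (j / M) = j / M * M := Nat.mul_comm _ _
    congr 1
    omega

-- ===== VERDICT (by name: the statement is the Claim_ definition above) =====
theorem solution_spec : Claim_equal_solution := by
  intro k m score _ hm
  have hm' : 1 ≤ m := hm
  unfold Spec_solution solution solution_alt
  have hs := PySem.List.sorted_pairwise_rev score (fun x : Int => x)
  rw [loopA_eq _ hs m hm' (score.length + 1) 0 0 le_rfl
        (by simp [PySem.List.length_sorted])]
  rw [sorted_rev_eq_reverse]
  simp only [List.length_reverse, PySem.List.length_sorted, PySem.List.len_eq]
  rw [foldl_enum_eq]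
  simp only [PySem.List.length_sorted, zero_add]
  -- names
  obtain ⟨M, rfl⟩ : ∃ M : Nat, m = (M : Int) := ⟨m.toNat, by omega⟩
  have hM : 1 ≤ M := by exact_mod_cast hm'
  set asc := PySem.List.sorted score (fun x => x) false with hasc
  set n := score.length with hn
  -- B side: congruent condition, then the strided characterisation of the matching ranks
  have hcond : ∀ j ∈ Finset.range n,
      (if PySem.Int.mod (j : Int) (M : Int) = PySem.Int.mod (n : Int) (M : Int)
        then asc.getD j 0 else 0)
      = (if j % M = n % M then asc.getD j 0 else 0) := by
    intro j _
    have : PySem.Int.mod (j : Int) (M : Int) = ((j % M : Nat) : Int) := PySem.Int.mod_natCast j M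
    rw [this, PySem.Int.mod_natCast n M]
    exact if_congr Nat.cast_inj rfl rfl
  rw [Finset.sum_congr rfl hcond, strided_sum M hM n (fun j => asc.getD j 0)]
  -- A side: unfold the range with step M
  rw [PySem.List.pyRange_of_pos _ _ (show (0:Int) < (M:Int) by exact_mod_cast hM)]
  have hif : (if (M:Int) - 1 < (n:Int) then (((n:Int) - ((M:Int) - 1) + (M:Int) - 1) / (M:Int)).toNat else 0) = n / M := by
    split_ifs with h
    · rw [show (n:Int) - ((M:Int) - 1) + (M:Int) - 1 = (n:Int) by ring,
        ← Int.natCast_ediv]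
      exact Int.toNat_natCast _
    · have : n < M := by omega
      rw [Nat.div_eq_of_lt this]
  rw [hif, List.map_map, sum_map_range_eq]
  rw [← Finset.sum_range_reflect (fun t => asc.getD (n % M + t * M) 0) (n / M)]
  have hkey : ∀ kk ∈ Finset.range (n / M),
      ((fun i => PySem.List.pyGetD asc.reverse i 0) ∘ fun k : Nat => (M:Int) - 1 + (M:Int) * (k:Int)) kk
        = (fun t => asc.getD (n % M + t * M) 0) (n / M - 1 - kk) := by
    intro kk hkk
    simp only [Finset.mem_range] at hkk
    obtain ⟨u, hu⟩ : ∃ u, n / M = kk + u + 1 := ⟨n / M - 1 - kk, by omega⟩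
    have hdm := Nat.div_add_mod n M
    have p1 : M * (kk + u + 1) = M * kk + M * u + M := by ring
    have hlen : asc.length = n := by rw [hasc, PySem.List.length_sorted]
    have hn2 : n = M * kk + M * u + M + n % M := by
      conv_lhs => rw [← hdm]
      rw [hu, p1]
    have hcast : (M:Int) - 1 + (M:Int) * (kk:Int) = ((M - 1 + M * kk : Nat) : Int) := by
      push_cast [Nat.cast_sub hM]
      ring
    have p2 : u * M = M * u := by ring
    have hb1 : M - 1 + M * kk < asc.reverse.length := by rw [List.length_reverse, hlen]; omega
    have hb2 : n % M + u * M < asc.length := by rw [hlen]; omega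
    simp only [Function.comp_apply, hcast, PySem.List.pyGetD_natCast]
    rw [List.getD_eq_getElem _ _ hb1, List.getElem_reverse,
      show n / M - 1 - kk = u from by omega,
      List.getD_eq_getElem _ _ hb2]
    congr 1
    rw [hlen]
    omega
  rw [Finset.sum_congr rfl hkey]
  ring
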